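-- pv_equiv track=rewrite | github.com/karen-alber11/property_sale_app | Fall 22/Machine Learning/FaceAndDigitClassification/FaceAndDigitClassification/Environmental_Variables.py | Horizontal_Image_Bounds_Tuple
-- ===== SOURCE A (Python) =====
-- def Horizontal_Image_Bounds_Tuple(img):
--     leftMost = 1000
--     rightMost = 0
--     j = 0
--     for line in img:
--         for char in line:
--             if(char == "#" or char == "+"):
--                 if(j > rightMost):
--                     rightMost = j
--                 if(j < leftMost):
--                     leftMost = j
--             j += 1
--         j = 0
--     return [leftMost, rightMost]
-- ===== SOURCE B (Python) =====
-- def Horizontal_Image_Bounds_Tuple(img):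
--     width = max(map(len, img), default=0)
--     filled = [c for c in range(width)
--               if any(c < len(line) and line[c] in ("#", "+") for line in img)]
--     return [min([1000] + filled), max([0] + filled)]
-- ===== Notes on version B (the rewrite author's own statement) =====
-- stated objective: alternative
-- what changed: Replaces the row-major nested loops with mutable left/right accumulators by a column-major pass: compute the grid width, build the list of filled columns once, and take its min/max together with the 1000/0 seed bounds.
import Mathlib
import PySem

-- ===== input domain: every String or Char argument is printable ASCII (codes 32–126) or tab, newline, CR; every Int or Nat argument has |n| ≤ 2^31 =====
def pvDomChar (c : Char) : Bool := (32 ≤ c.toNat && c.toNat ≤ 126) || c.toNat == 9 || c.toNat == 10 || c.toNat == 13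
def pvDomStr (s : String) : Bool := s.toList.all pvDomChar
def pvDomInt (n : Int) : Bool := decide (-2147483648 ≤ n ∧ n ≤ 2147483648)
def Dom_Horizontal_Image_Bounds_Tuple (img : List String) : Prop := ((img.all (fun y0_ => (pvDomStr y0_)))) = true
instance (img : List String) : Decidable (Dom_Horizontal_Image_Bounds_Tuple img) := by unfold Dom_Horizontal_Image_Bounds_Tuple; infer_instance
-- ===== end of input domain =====

-- B recomputes the same bounds column-major (width, then the filled-column list, then min/max with the 1000/0 seeds) instead of A's row-major nested loops with mutable accumulators; same cost, different decomposition.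

-- ===== PORT A =====
-- literal transliteration of A: nested foldl over lines/chars with state (leftMost, rightMost, j)
def Horizontal_Image_Bounds_Tuple (img : List String) : List Int :=
  let fin := img.foldl (fun (st : Int × Int) (line : String) =>
      let r := line.toList.foldl (fun (s : Int × Int × Int) ch =>
          if ch == '#' || ch == '+' then
            (if s.2.2 < s.1 then s.2.2 else s.1,
             if s.2.2 > s.2.1 then s.2.2 else s.2.1,
             s.2.2 + 1)
          else (s.1, s.2.1, s.2.2 + 1))
        (st.1, st.2, (0 : Int))
      (r.1, r.2.1))
    ((1000 : Int), (0 : Int))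
  [fin.1, fin.2]

-- ===== PORT B =====
def pvIsFill (ch : Char) : Bool := ch == '#' || ch == '+'

-- c < len(line) and line[c] in ("#", "+")
def pvFilledCol (img : List String) (c : Nat) : Bool :=
  img.any (fun line => (line.toList[c]?).any pvIsFill)

def Horizontal_Image_Bounds_Tuple_alt (img : List String) : List Int :=
  let width := img.foldl (fun w line => max w line.toList.length) 0
  let filled := ((List.range width).filter (pvFilledCol img)).map (fun c => Int.ofNat c)
  [filled.foldl min (1000 : Int), filled.foldl max (0 : Int)]

-- ===== PRECONDITION & SPEC =====
def Spec_Horizontal_Image_Bounds_Tuple (img : List String) (out : List Int) : Prop := out = Horizontal_Image_Bounds_Tuple_alt img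
instance (img : List String) (out : List Int) : Decidable (Spec_Horizontal_Image_Bounds_Tuple img out) := by unfold Spec_Horizontal_Image_Bounds_Tuple; infer_instance

-- ===== CLAIM (what is proved, stated in full; the proofs are below) =====
def Claim_equal_Horizontal_Image_Bounds_Tuple : Prop := ∀ (img : List String), Dom_Horizontal_Image_Bounds_Tuple img → Spec_Horizontal_Image_Bounds_Tuple img (Horizontal_Image_Bounds_Tuple img)

-- ===== LEMMAS AND PROOFS =====

-- filled cell indices of one row, counted from offset j (row-major order)
def pvFillIdxs (cs : List Char) (j : Int) : List Int :=
  match cs with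
  | [] => []
  | c :: t => if pvIsFill c then j :: pvFillIdxs t (j + 1) else pvFillIdxs t (j + 1)

-- all filled cell column indices of the image, row-major, with duplicates
def pvCells (img : List String) : List Int := img.flatMap (fun l => pvFillIdxs l.toList 0)

lemma min_alt (a b : Int) : (if b < a then b else a) = min a b := by omega
lemma max_alt (a b : Int) : (if b > a then b else a) = max a b := by omega

lemma inner_eq (cs : List Char) (lm rm j : Int) :
    cs.foldl (fun (s : Int × Int × Int) ch =>
        if ch == '#' || ch == '+' then
          (if s.2.2 < s.1 then s.2.2 else s.1,
           if s.2.2 > s.2.1 then s.2.2 else s.2.1,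
           s.2.2 + 1)
        else (s.1, s.2.1, s.2.2 + 1)) (lm, rm, j)
    = ((pvFillIdxs cs j).foldl min lm, (pvFillIdxs cs j).foldl max rm, j + cs.length) := by
  induction cs generalizing lm rm j with
  | nil => simp [pvFillIdxs]
  | cons c t ih =>
    by_cases h : pvIsFill c
    · have h' : (c == '#' || c == '+') = true := h
      simp only [List.foldl_cons, pvFillIdxs, h, if_true, h']
      rw [ih]
      simp only [List.length_cons, min_alt, max_alt, Prod.mk.injEq]
      refine ⟨trivial, trivial, by push_cast; ring⟩
    · have h' : (c == '#' || c == '+') = false := by simpa [pvIsFill] using h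
      simp only [List.foldl_cons, pvFillIdxs, h, Bool.false_eq_true, if_false, h']
      rw [ih]
      simp only [List.length_cons, Prod.mk.injEq]
      refine ⟨trivial, trivial, by push_cast; ring⟩

lemma outer_gen (f : Int × Int → String → Int × Int)
    (hf : ∀ st line, f st line =
      ((pvFillIdxs line.toList 0).foldl min st.1, (pvFillIdxs line.toList 0).foldl max st.2))
    (img : List String) (lm rm : Int) :
    img.foldl f (lm, rm) = ((pvCells img).foldl min lm, (pvCells img).foldl max rm) := by
  induction img generalizing lm rm with
  | nil => simp [pvCells]
  | cons l t ih =>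
    simp only [pvCells, List.flatMap_cons, List.foldl_append]
    rw [List.foldl_cons, hf, ih]
    rfl

lemma le_foldl_min (c a : Int) (l : List Int) : c ≤ l.foldl min a ↔ c ≤ a ∧ ∀ x ∈ l, c ≤ x := by
  induction l generalizing a with
  | nil => simp
  | cons y t ih =>
    simp [ih]
    tauto

lemma foldl_max_le (c a : Int) (l : List Int) : l.foldl max a ≤ c ↔ a ≤ c ∧ ∀ x ∈ l, x ≤ c := by
  induction l generalizing a with
  | nil => simp
  | cons y t ih =>
    simp [ih]
    tauto

lemma foldl_min_congr (a : Int) (l₁ l₂ : List Int) (h : ∀ x, x ∈ l₁ ↔ x ∈ l₂) :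
    l₁.foldl min a = l₂.foldl min a := by
  have h₁ := (le_foldl_min (l₁.foldl min a) a l₁).mp le_rfl
  have h₂ := (le_foldl_min (l₂.foldl min a) a l₂).mp le_rfl
  apply le_antisymm
  · exact (le_foldl_min _ a l₂).mpr ⟨h₁.1, fun x hx => h₁.2 x ((h x).mpr hx)⟩
  · exact (le_foldl_min _ a l₁).mpr ⟨h₂.1, fun x hx => h₂.2 x ((h x).mp hx)⟩

lemma foldl_max_congr (a : Int) (l₁ l₂ : List Int) (h : ∀ x, x ∈ l₁ ↔ x ∈ l₂) :
    l₁.foldl max a = l₂.foldl max a := by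
  have h₁ := (foldl_max_le (l₁.foldl max a) a l₁).mp le_rfl
  have h₂ := (foldl_max_le (l₂.foldl max a) a l₂).mp le_rfl
  apply le_antisymm
  · exact (foldl_max_le _ a l₁).mpr ⟨h₂.1, fun x hx => h₂.2 x ((h x).mp hx)⟩
  · exact (foldl_max_le _ a l₂).mpr ⟨h₁.1, fun x hx => h₁.2 x ((h x).mpr hx)⟩

lemma mem_fillIdxs (cs : List Char) (j x : Int) :
    x ∈ pvFillIdxs cs j ↔ ∃ n : Nat, (cs[n]?).any pvIsFill ∧ x = j + n := by
  induction cs generalizing j with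
  | nil => simp [pvFillIdxs]
  | cons c t ih =>
    by_cases h : pvIsFill c
    · simp only [pvFillIdxs, h, if_true, List.mem_cons, ih]
      constructor
      · rintro (rfl | ⟨n, hn, rfl⟩)
        · exact ⟨0, by simpa using h, by simp⟩
        · exact ⟨n + 1, by simpa using hn, by push_cast; ring⟩
      · rintro ⟨n, hn, rfl⟩
        cases n with
        | zero => left; simp
        | succ m => right; exact ⟨m, by simpa using hn, by push_cast; ring⟩
    · simp only [pvFillIdxs, h, Bool.false_eq_true, if_false, ih]
      constructor
      · rintro ⟨n, hn, rfl⟩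
        exact ⟨n + 1, by simpa using hn, by push_cast; ring⟩
      · rintro ⟨n, hn, rfl⟩
        cases n with
        | zero => simp [h] at hn
        | succ m => exact ⟨m, by simpa using hn, by push_cast; ring⟩

lemma init_le_foldl_len (img : List String) (a : Nat) :
    a ≤ img.foldl (fun w line => max w line.toList.length) a := by
  induction img generalizing a with
  | nil => simp
  | cons l t ih => exact le_trans (le_max_left _ _) (ih _)

lemma len_le_width (img : List String) (l : String) (hl : l ∈ img) (a : Nat) :
    l.toList.length ≤ img.foldl (fun w line => max w line.toList.length) a := by
  induction img generalizing a with
  | nil => simp at hl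
  | cons y t ih =>
    rcases List.mem_cons.mp hl with rfl | h
    · exact le_trans (le_max_right _ _) (init_le_foldl_len t _)
    · exact ih h _

lemma mem_filled_iff (img : List String) (x : Int) :
    (x ∈ (((List.range (img.foldl (fun w line => max w line.toList.length) 0)).filter
        (pvFilledCol img)).map (fun c => Int.ofNat c))) ↔ x ∈ pvCells img := by
  constructor
  · intro hx
    simp only [List.mem_map, List.mem_filter, List.mem_range] at hx
    obtain ⟨c, ⟨hc, hp⟩, rfl⟩ := hx
    simp only [pvFilledCol, List.any_eq_true] at hp
    obtain ⟨l, hl, hfill⟩ := hp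
    simp only [pvCells, List.mem_flatMap]
    exact ⟨l, hl, (mem_fillIdxs _ _ _).mpr ⟨c, hfill, by simp⟩⟩
  · intro hx
    simp only [pvCells, List.mem_flatMap] at hx
    obtain ⟨l, hl, hmem⟩ := hx
    obtain ⟨n, hn, rfl⟩ := (mem_fillIdxs _ _ _).mp hmem
    have hlt : n < l.toList.length := by
      cases hg : l.toList[n]? with
      | none => simp [hg] at hn
      | some ch => exact (List.getElem?_eq_some_iff.mp hg).1
    simp only [List.mem_map, List.mem_filter, List.mem_range]
    refine ⟨n, ⟨lt_of_lt_of_le hlt (len_le_width img l hl 0), ?_⟩, by simp⟩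
    simp only [pvFilledCol, List.any_eq_true]
    exact ⟨l, hl, hn⟩

-- ===== VERDICT (by name: the statement is the Claim_ definition above) =====
theorem Horizontal_Image_Bounds_Tuple_spec : Claim_equal_Horizontal_Image_Bounds_Tuple := by
  intro img _
  show _ = _
  simp only [Horizontal_Image_Bounds_Tuple, Horizontal_Image_Bounds_Tuple_alt]
  rw [outer_gen _ (fun st line => by rw [inner_eq]) img 1000 0]
  rw [foldl_min_congr 1000 (pvCells img) _ (fun x => (mem_filled_iff img x).symm),
      foldl_max_congr 0 (pvCells img) _ (fun x => (mem_filled_iff img x).symm)]
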